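-- pv_equiv track=rewrite | github.com/mohammadelhsn/CP104 | elha7950_l08/src/functions.py | min_search
-- ===== SOURCE A (Python) =====
-- def min_search(values: list):
--     """
--     -------------------------------------------------------
--     Searches through values for the minimum value(s) and returns a
--     list of the indexes of those values. (Assumes values has at least
--     one element.)
--     User: indexes = min_search(values)
--     -------------------------------------------------------
--     Parameters:
--         values - a list of values (list of *).
--     Returns:
--         indexes - a list of indexes of the minimum values in
--             values (list of int).
--     -------------------------------------------------------
--     """
--     indexes = []
--
--     # Copy the list so as to not modify the original and mess up the indexes.
--
--     values2: list = values.copy()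
--
--     # Sorts from smallest to highest, so index at 0 is always going to be the smallest number.
--
--     values2.sort()
--
--     minimum = values2[0]
--
--     # Check all numbers that are the same as the minimum
--
--     for i in range(len(values)):
--         if (values[i] == minimum):
--             indexes.append(i)
--
--     # Return list
--
--     return indexes
-- ===== SOURCE B (Python) =====
-- def min_search(values: list):
--     # Single left-to-right pass: track the smallest value seen and its indexes.
--     minimum = values[0]
--     indexes = [0]
--     for i, v in enumerate(values[1:], 1):
--         if v < minimum:
--             minimum = v
--             indexes = [i]
--         elif v == minimum:
--             indexes.append(i)
--     return indexes
-- ===== Notes on version B (the rewrite author's own statement) =====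
-- stated objective: alternative
-- what changed: Replaces the sort-then-rescan (sort a copy, take its head, then rescan all indices) with a single left-to-right pass maintaining the running minimum and its index list; no sort and no second pass, though the pure-Python loop is not measurably faster than the C-level sort.
import Mathlib
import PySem

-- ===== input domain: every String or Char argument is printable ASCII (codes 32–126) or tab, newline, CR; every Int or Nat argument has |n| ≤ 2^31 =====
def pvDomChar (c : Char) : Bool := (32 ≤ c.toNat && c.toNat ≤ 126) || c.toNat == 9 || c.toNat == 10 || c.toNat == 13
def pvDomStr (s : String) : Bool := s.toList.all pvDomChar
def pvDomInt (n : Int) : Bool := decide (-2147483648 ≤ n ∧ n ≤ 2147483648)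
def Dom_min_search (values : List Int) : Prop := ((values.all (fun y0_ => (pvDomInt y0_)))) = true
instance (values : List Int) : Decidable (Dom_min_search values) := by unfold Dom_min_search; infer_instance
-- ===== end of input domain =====

-- B replaces A's sort-then-rescan with a single left-to-right pass maintaining the running minimum and its indexes.

-- ===== PORT A =====
-- sort a copy, take its head as the minimum, then scan all indices collecting matches
def min_search (values : List Int) : List Int :=
  let values2 := PySem.List.sorted values (fun x => x) false
  let minimum := PySem.List.pyGetD values2 0 0   -- values2[0]; Pre_ excludes the empty list, where Python raises IndexError
  (PySem.List.pyRange 0 (values.length : Int) 1).foldl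
    (fun indexes i => if PySem.List.pyGetD values i 0 = minimum then indexes ++ [i] else indexes) []

-- ===== PORT B =====
-- B's loop: remaining elements, current index, running minimum, collected indexes
def minSearchLoop : List Int → Int → Int → List Int → List Int
  | [], _, _, indexes => indexes
  | v :: rest, i, minimum, indexes =>
      if v < minimum then minSearchLoop rest (i + 1) v [i]
      else if v = minimum then minSearchLoop rest (i + 1) minimum (indexes ++ [i])
      else minSearchLoop rest (i + 1) minimum indexes

def min_search_alt (values : List Int) : List Int :=
  match values with
  | [] => []                         -- unreachable under Pre_ (Python B raises IndexError on [] too)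
  | v :: rest => minSearchLoop rest 1 v [0]

-- ===== PRECONDITION & SPEC =====
-- A raises IndexError on the empty list (values2[0]); Pre_ excludes exactly that input.
def Pre_min_search (values : List Int) : Prop := values ≠ []
instance (values : List Int) : Decidable (Pre_min_search values) := by unfold Pre_min_search; infer_instance
def pvWitness_min_search : List Int := ([3, 1, 1, 2])
def Spec_min_search (values : List Int) (out : List Int) : Prop := out = min_search_alt values
instance (values : List Int) (out : List Int) : Decidable (Spec_min_search values out) := by unfold Spec_min_search; infer_instance

-- ===== CLAIM (what is proved, stated in full; the proofs are below) =====
def Claim_equal_min_search : Prop := ∀ (values : List Int), Dom_min_search values → Pre_min_search values → Spec_min_search values (min_search values)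

-- ===== LEMMAS AND PROOFS =====

-- indexes (starting at i) of the occurrences of m in l
def posOf : List Int → Int → Int → List Int
  | [], _, _ => []
  | v :: rest, i, m => (if v = m then [i] else []) ++ posOf rest (i + 1) m

lemma foldl_min_spec (l : List Int) (a : Int) :
    l.foldl min a ∈ a :: l ∧ ∀ y ∈ a :: l, l.foldl min a ≤ y :=
  List.min?_eq_some_iff.mp (rfl : (a :: l).min? = some (l.foldl min a))

-- B's loop computes the positions of the overall minimum, keeping the prefix indexes only if the minimum is not beaten
lemma minSearchLoop_eq : ∀ (l : List Int) (i m : Int) (idxs : List Int),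
    minSearchLoop l i m idxs =
      (if m = l.foldl min m then idxs else []) ++ posOf l i (l.foldl min m) := by
  intro l
  induction l with
  | nil => intro i m idxs; simp [minSearchLoop, posOf]
  | cons v rest ih =>
      intro i m idxs
      simp only [List.foldl_cons]
      rcases lt_trichotomy v m with hlt | heq | hgt
      · have hmin : min m v = v := min_eq_right (le_of_lt hlt)
        simp only [hmin]
        have hFle : rest.foldl min v ≤ v := (foldl_min_spec rest v).2 v List.mem_cons_self
        have hne : m ≠ rest.foldl min v := by omega
        simp only [minSearchLoop, if_pos hlt, ih, posOf, if_neg hne]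
        simp
      · subst heq
        simp only [min_self]
        simp only [minSearchLoop, lt_irrefl, if_false, ih, posOf]
        by_cases hm : v = rest.foldl min v
        · rw [if_pos hm, if_pos hm, if_pos hm]; simp
        · rw [if_neg hm, if_neg hm, if_neg hm]; simp
      · have hmin : min m v = m := min_eq_left (le_of_lt hgt)
        simp only [hmin]
        have hFle : rest.foldl min m ≤ m := (foldl_min_spec rest m).2 m List.mem_cons_self
        have hne : v ≠ rest.foldl min m := by omega
        have hlt' : ¬ v < m := by omega
        have heq' : ¬ v = m := by omega
        simp only [minSearchLoop, if_neg hlt', if_neg heq', ih, posOf, if_neg hne]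
        simp

-- A's index filter over range(len(values)) is posOf
lemma filter_range_eq_posOf : ∀ (xs full : List Int) (k : Nat) (M : Int), xs = full.drop k →
    (PySem.List.pyRange (k : Int) (full.length : Int) 1).filter
      (fun i => decide (PySem.List.pyGetD full i 0 = M)) = posOf xs (k : Int) M := by
  intro xs
  induction xs with
  | nil =>
      intro full k M h
      have hlen : full.length ≤ k := by
        have := congrArg List.length h
        simp at this
        omega
      rw [PySem.List.pyRange_one_eq_nil (by exact_mod_cast hlen)]
      simp [posOf]
  | cons v rest ih =>
      intro full k M h
      have hk : k < full.length := by
        by_contra hk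
        rw [List.drop_eq_nil_iff.mpr (by omega)] at h
        simp at h
      have hv' : full[k]? = some v := by
        have h0 : (full.drop k)[0]? = some v := by rw [← h]; rfl
        rw [List.getElem?_drop] at h0
        simpa using h0
      have hrest : rest = full.drop (k + 1) := by
        have := congrArg List.tail h
        simpa [List.tail_drop] using this
      have hgd : PySem.List.pyGetD full (k : Int) 0 = v := by
        rw [PySem.List.pyGetD_natCast]
        simp [List.getD_eq_getElem?_getD, hv']
      have ihr := ih full (k + 1) M hrest
      push_cast at ihr
      rw [PySem.List.pyRange_one_cons (by exact_mod_cast hk), List.filter_cons]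
      by_cases hvM : v = M
      · simp [hgd, hvM, posOf, ihr]
      · simp [hgd, hvM, posOf, ihr]

lemma min_search_eq_posOf (v : Int) (rest : List Int) :
    min_search (v :: rest) = posOf (v :: rest) 0 (rest.foldl min v) := by
  obtain ⟨m, t, hsort⟩ : ∃ m t, PySem.List.sorted (v :: rest) (fun x => x) false = m :: t := by
    cases hs : PySem.List.sorted (v :: rest) (fun x => x) false with
    | nil =>
        have := PySem.List.length_sorted (v :: rest) (fun x => x) false
        rw [hs] at this; simp at this
    | cons m t => exact ⟨m, t, rfl⟩
  have hmem : m ∈ v :: rest := by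
    have := PySem.List.sorted_perm (v :: rest) (fun x => x) false
    rw [hsort] at this
    exact this.mem_iff.mp List.mem_cons_self
  have hle : ∀ y ∈ v :: rest, m ≤ y := PySem.List.key_head_sorted_le (v :: rest) (fun x => x) hsort
  have hM : m = rest.foldl min v := by
    have h1 : rest.foldl min v ≤ m := (foldl_min_spec rest v).2 m hmem
    have h2 : m ≤ rest.foldl min v := hle _ (foldl_min_spec rest v).1
    omega
  show (PySem.List.pyRange 0 ((v :: rest).length : Int) 1).foldl
      (fun indexes i => if PySem.List.pyGetD (v :: rest) i 0 =
          PySem.List.pyGetD (PySem.List.sorted (v :: rest) (fun x => x) false) 0 0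
        then indexes ++ [i] else indexes) [] = _
  rw [hsort, PySem.List.pyGetD_zero_cons]
  rw [PySem.List.foldl_append_ite_eq_filter (p := fun i => PySem.List.pyGetD (v :: rest) i 0 = m)]
  have hfil := filter_range_eq_posOf (v :: rest) (v :: rest) 0 m rfl
  push_cast at hfil
  rw [List.nil_append, hfil, hM]

-- ===== VERDICT (by name: the statement is the Claim_ definition above) =====
theorem min_search_spec : Claim_equal_min_search := by
  intro values _ hpre
  unfold Spec_min_search
  cases values with
  | nil => exact absurd rfl hpre
  | cons v rest =>
      rw [min_search_eq_posOf]
      show _ = minSearchLoop rest 1 v [0]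
      rw [minSearchLoop_eq]
      by_cases hv : v = rest.foldl min v
      · simp only [posOf, ← hv]
        simp
      · simp only [posOf, if_neg hv]
        simp
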